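-- pv_equiv track=rewrite | github.com/zaffarelli/wawwod | collector/models/creatures.py | as_dot
-- ===== SOURCE A (Python) =====
-- def as_dot(value, max=5, to_spend=False):
--     str = ""
--     if to_spend:
--         str = f"{value}"
--         for x in range(value):
--             if x % 5 == 0:
--                 str += "-"
--             str += "❍"
--
--     else:
--         for x in range(value):
--             str += "●"
--             if x % 5 == 4:
--                 str += " "
--         for x in range(max - value):
--             str += "❍"
--             if x % 5 == 4:
--                 str += " "
--     return str
-- ===== SOURCE B (Python) =====
-- def _chunks5(s):
--     out = []
--     i = 0
--     while i < len(s):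
--         out.append(s[i:i + 5])
--         i += 5
--     return out
--
--
-- def as_dot(value, max=5, to_spend=False):
--     if to_spend:
--         out = f"{value}"
--         for chunk in _chunks5("\u274d" * value):
--             out += "-" + chunk
--         return out
--     out = ""
--     for run in ("\u25cf" * value, "\u274d" * (max - value)):
--         for chunk in _chunks5(run):
--             out += chunk + (" " if len(chunk) == 5 else "")
--     return out
-- ===== Notes on version B (the rewrite author's own statement) =====
-- stated objective: alternative
-- what changed: B builds each run by string repetition ('●'*value, '❍'*(max-value)) and emits it in slices of five characters (space after every full chunk, '-' before every chunk), replacing A's per-character loops with an x % 5 test at every index.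
import Mathlib
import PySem

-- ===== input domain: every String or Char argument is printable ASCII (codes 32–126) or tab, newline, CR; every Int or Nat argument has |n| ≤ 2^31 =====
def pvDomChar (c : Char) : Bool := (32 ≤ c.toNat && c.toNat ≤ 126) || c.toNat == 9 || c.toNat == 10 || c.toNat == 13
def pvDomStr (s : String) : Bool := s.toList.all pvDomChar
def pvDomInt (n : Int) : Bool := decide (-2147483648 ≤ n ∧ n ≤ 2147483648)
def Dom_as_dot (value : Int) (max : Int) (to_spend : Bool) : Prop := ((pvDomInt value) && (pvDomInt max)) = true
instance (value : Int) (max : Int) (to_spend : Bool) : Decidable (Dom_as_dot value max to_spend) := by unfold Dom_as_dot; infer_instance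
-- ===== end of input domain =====

-- B builds each run by repetition and walks it in chunks of five instead of per character
-- with modulo tests (objective: alternative decomposition, same cost).

-- ===== PORT A =====
-- per-character loops over range(value) / range(max - value), spacing decided by x % 5
def as_dot (value : Int) (max : Int) (to_spend : Bool) : String :=
  if to_spend then
    (PySem.List.pyRange 0 value 1).foldl
      (fun s x => (if PySem.Int.mod x 5 = 0 then s ++ "-" else s) ++ "❍")
      (PySem.Int.toStr value)
  else
    let s1 := (PySem.List.pyRange 0 value 1).foldl
      (fun s x => if PySem.Int.mod x 5 = 4 then (s ++ "●") ++ " " else s ++ "●") ""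
    (PySem.List.pyRange 0 (max - value) 1).foldl
      (fun s x => if PySem.Int.mod x 5 = 4 then (s ++ "❍") ++ " " else s ++ "❍") s1

-- ===== PORT B =====
-- Source B's _chunks5: i = 0; while i < len(s): out.append(s[i:i+5]); i += 5
-- (the slice s[i:i+5] is (l.drop i).take 5 — PySem.List.slice_natCast_add)
def chunks5Go (l : List Char) (i : Nat) : List (List Char) :=
  if _h : i < l.length then (l.drop i).take 5 :: chunks5Go l (i + 5) else []
termination_by l.length - i

def chunks5 (l : List Char) : List (List Char) := chunks5Go l 0

def as_dot_alt (value : Int) (max : Int) (to_spend : Bool) : String :=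
  if to_spend then
    (chunks5 (PySem.List.pyRepeat ['❍'] value)).foldl
      (fun out chunk => out ++ ("-" ++ String.ofList chunk))
      (PySem.Int.toStr value)
  else
    [PySem.List.pyRepeat ['●'] value, PySem.List.pyRepeat ['❍'] (max - value)].foldl
      (fun out run =>
        (chunks5 run).foldl
          (fun o c => o ++ (String.ofList c ++ (if c.length = 5 then " " else ""))) out)
      ""

-- ===== PRECONDITION & SPEC =====
def Spec_as_dot (value : Int) (max : Int) (to_spend : Bool) (out : String) : Prop := out = as_dot_alt value max to_spend
instance (value : Int) (max : Int) (to_spend : Bool) (out : String) : Decidable (Spec_as_dot value max to_spend out) := by unfold Spec_as_dot; infer_instance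

-- ===== CLAIM (what is proved, stated in full; the proofs are below) =====
def Claim_equal_as_dot : Prop := ∀ (value : Int) (max : Int) (to_spend : Bool), Dom_as_dot value max to_spend → Spec_as_dot value max to_spend (as_dot value max to_spend)

-- ===== LEMMAS AND PROOFS =====

-- proof-side recharacterisation of chunks5: consume the list five characters at a time
def chunksRec (l : List Char) : List (List Char) :=
  if h : l = [] then [] else l.take 5 :: chunksRec (l.drop 5)
termination_by l.length
decreasing_by
  have := List.length_pos_of_ne_nil h
  simp
  omega

lemma chunks5Go_eq (l : List Char) (i : Nat) : chunks5Go l i = chunksRec (l.drop i) := by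
  rw [chunks5Go, chunksRec]
  by_cases h : i < l.length
  · have hne : l.drop i ≠ [] := by
      simp [List.drop_eq_nil_iff]
      omega
    simp only [h, dite_true, hne, dite_false]
    rw [List.drop_drop, chunks5Go_eq l (i + 5)]
  · have hnil : l.drop i = [] := by
      rw [List.drop_eq_nil_iff]
      omega
    simp [h, hnil]
termination_by l.length - i

lemma chunks5_eq (l : List Char) : chunks5 l = chunksRec l := by
  rw [chunks5, chunks5Go_eq, List.drop_zero]

-- the character block A's normal-branch loop emits at index x (as a Nat)
def gMark (c : Char) (k : Nat) : List Char := c :: (if k % 5 = 4 then [' '] else [])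
-- the character block A's to_spend loop emits at index x
def gSpend (k : Nat) : List Char := (if k % 5 = 0 then ['-'] else []) ++ ['❍']

lemma foldA_mark (c : Char) (sp : String) (l : List Int) (s : String)
    (hc : sp.toList = [c]) :
    (l.foldl (fun s x => if PySem.Int.mod x 5 = 4 then (s ++ sp) ++ " " else s ++ sp) s).toList
      = s.toList ++ l.flatMap (fun x => c :: (if PySem.Int.mod x 5 = 4 then [' '] else [])) := by
  induction l generalizing s with
  | nil => simp
  | cons a t ih =>
    simp only [List.foldl, List.flatMap_cons]
    split_ifs with h <;> rw [ih] <;> simp [hc]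

lemma foldA_spend (l : List Int) (s : String) :
    (l.foldl (fun s x => (if PySem.Int.mod x 5 = 0 then s ++ "-" else s) ++ "❍") s).toList
      = s.toList ++ l.flatMap (fun x => (if PySem.Int.mod x 5 = 0 then ['-'] else []) ++ ['❍']) := by
  induction l generalizing s with
  | nil => simp
  | cons a t ih =>
    simp only [List.foldl, List.flatMap_cons]
    split_ifs with h <;> rw [ih] <;> simp

lemma foldB_flat {α : Type} (g : α → String) (l : List α) (s : String) :
    (l.foldl (fun o c => o ++ g c) s).toList = s.toList ++ l.flatMap (fun c => (g c).toList) := by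
  induction l generalizing s with
  | nil => simp
  | cons a t ih => simp [List.foldl, ih]

lemma chunksRec_nil : chunksRec [] = [] := by rw [chunksRec]; simp

lemma chunksRec_replicate_small (c : Char) (n : Nat) (h0 : 0 < n) (h5 : n ≤ 5) :
    chunksRec (List.replicate n c) = [List.replicate n c] := by
  rw [chunksRec]
  have hne : List.replicate n c ≠ [] := by simp; omega
  simp only [hne, dite_false, List.take_replicate, List.drop_replicate]
  have h1 : min 5 n = n := by omega
  have h2 : n - 5 = 0 := by omega
  rw [h1, h2]
  simp [chunksRec_nil]

lemma chunksRec_replicate_add (c : Char) (m : Nat) :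
    chunksRec (List.replicate (m + 5) c) = List.replicate 5 c :: chunksRec (List.replicate m c) := by
  rw [chunksRec]
  have hne : List.replicate (m + 5) c ≠ [] := by simp
  simp only [hne, dite_false, List.take_replicate, List.drop_replicate]
  have h1 : min 5 (m + 5) = 5 := by omega
  have h2 : m + 5 - 5 = m := by omega
  rw [h1, h2]

-- per-character output = chunked output, normal branch
lemma mark_eq (c : Char) (n : Nat) :
    (List.range n).flatMap (gMark c)
      = (chunksRec (List.replicate n c)).flatMap
          (fun ch => ch ++ (if ch.length = 5 then [' '] else [])) := by
  induction n using Nat.strong_induction_on with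
  | _ n ih =>
    match n with
    | 0 => simp [chunksRec_nil]
    | 1 | 2 | 3 | 4 =>
      rw [chunksRec_replicate_small c _ (by omega) (by omega)]
      simp [List.range_succ, gMark]
    | m + 5 =>
      have hsplit : List.range (m + 5) = List.range 5 ++ (List.range m).map (5 + ·) := by
        rw [Nat.add_comm m 5]; exact List.range_add (n := 5) (m := m)
      rw [hsplit, List.flatMap_append, List.flatMap_map, chunksRec_replicate_add,
          List.flatMap_cons]
      have hper : ((List.range m).flatMap (fun k => gMark c (5 + k)))
          = (List.range m).flatMap (gMark c) := by
        apply List.flatMap_congr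
        intro k _
        simp [gMark, Nat.add_mod_left]
      rw [hper, ih m (by omega)]
      simp [List.range_succ, gMark]

-- per-character output = chunked output, to_spend branch
lemma spend_eq (n : Nat) :
    (List.range n).flatMap gSpend
      = (chunksRec (List.replicate n '❍')).flatMap (fun ch => '-' :: ch) := by
  induction n using Nat.strong_induction_on with
  | _ n ih =>
    match n with
    | 0 => simp [chunksRec_nil]
    | 1 | 2 | 3 | 4 =>
      rw [chunksRec_replicate_small '❍' _ (by omega) (by omega)]
      simp [List.range_succ, gSpend]
    | m + 5 =>
      have hsplit : List.range (m + 5) = List.range 5 ++ (List.range m).map (5 + ·) := by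
        rw [Nat.add_comm m 5]; exact List.range_add (n := 5) (m := m)
      rw [hsplit, List.flatMap_append, List.flatMap_map, chunksRec_replicate_add,
          List.flatMap_cons]
      have hper : ((List.range m).flatMap (fun k => gSpend (5 + k)))
          = (List.range m).flatMap gSpend := by
        apply List.flatMap_congr
        intro k _
        simp [gSpend, Nat.add_mod_left]
      rw [hper, ih m (by omega)]
      simp [List.range_succ, gSpend]

-- pyRange's Int-indexed flatMap is the Nat-indexed one
lemma pyRange_flatMap_mark (c : Char) (v : Int) :
    (PySem.List.pyRange 0 v 1).flatMap
        (fun x => c :: (if PySem.Int.mod x 5 = 4 then [' '] else []))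
      = (List.range v.toNat).flatMap (gMark c) := by
  rw [PySem.List.pyRange_one, List.flatMap_map]
  simp only [Int.sub_zero]
  apply List.flatMap_congr
  intro k _
  have hcast : (((k % 5 : Nat) : Int) = 4) ↔ (k % 5 = 4) := by omega
  have h5 : PySem.Int.mod ((k : Int)) 5 = ((k % 5 : Nat) : Int) := by
    exact_mod_cast PySem.Int.mod_natCast k 5
  rw [Int.zero_add, h5]
  simp only [gMark, hcast]

lemma pyRange_flatMap_spend (v : Int) :
    (PySem.List.pyRange 0 v 1).flatMap
        (fun x => (if PySem.Int.mod x 5 = 0 then ['-'] else []) ++ ['❍'])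
      = (List.range v.toNat).flatMap gSpend := by
  rw [PySem.List.pyRange_one, List.flatMap_map]
  simp only [Int.sub_zero]
  apply List.flatMap_congr
  intro k _
  have hcast : (((k % 5 : Nat) : Int) = 0) ↔ (k % 5 = 0) := by omega
  have h5 : PySem.Int.mod ((k : Int)) 5 = ((k % 5 : Nat) : Int) := by
    exact_mod_cast PySem.Int.mod_natCast k 5
  rw [Int.zero_add, h5]
  simp only [gSpend, hcast]

-- ===== VERDICT (by name: the statement is the Claim_ definition above) =====
theorem as_dot_spec : Claim_equal_as_dot := by
  intro value max to_spend _
  unfold Spec_as_dot as_dot as_dot_alt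
  simp only [chunks5_eq]
  cases to_spend with
  | true =>
    simp only [reduceIte]
    apply String.toList_injective ?_
    rw [foldA_spend, foldB_flat]
    congr 1
    rw [pyRange_flatMap_spend, PySem.List.pyRepeat_singleton, spend_eq]
    apply List.flatMap_congr
    intro ch _
    simp
  | false =>
    simp only [Bool.false_eq_true, reduceIte, List.foldl]
    apply String.toList_injective ?_
    rw [foldA_mark '❍' "❍" _ _ (by decide), foldA_mark '●' "●" _ _ (by decide)]
    rw [foldB_flat, foldB_flat]
    simp only [String.toList_empty, List.nil_append]
    rw [pyRange_flatMap_mark, pyRange_flatMap_mark,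
        PySem.List.pyRepeat_singleton, PySem.List.pyRepeat_singleton,
        mark_eq, mark_eq]
    congr 1 <;>
    · apply List.flatMap_congr
      intro ch _
      split_ifs <;> simp
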